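-- pv_equiv track=rewrite | github.com/Thireus/GGUF-Tool-Suite | recipe_to_colab_params.py | collect_flag_values
-- ===== SOURCE A (Python) =====
-- from typing import List, Dict, Any, Optional
--
-- def collect_flag_values(tokens: List[str], flag: str) -> List[str]:
--     """
--     Return tokens belonging to the given flag.
--     Values are all tokens after the flag until the next token beginning with '--' or end.
--     """
--     vals: List[str] = []
--     i = 0
--     while i < len(tokens):
--         t = tokens[i]
--         if t == flag:
--             i += 1
--             while i < len(tokens) and not tokens[i].startswith("--"):
--                 vals.append(tokens[i])
--                 i += 1
--         else:
--             i += 1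
--     return vals
-- ===== SOURCE B (Python) =====
-- def collect_flag_values(tokens, flag):
--     vals = []
--     collecting = False
--     for t in tokens:
--         if collecting and not t.startswith("--"):
--             vals.append(t)
--         else:
--             collecting = (t == flag)
--     return vals
-- ===== Notes on version B (the rewrite author's own statement) =====
-- stated objective: idiomatic
-- what changed: Replaced the index-based outer while loop with a nested collecting while loop by a single flat for-loop over the tokens maintaining one boolean 'collecting' state variable.
import Mathlib
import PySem

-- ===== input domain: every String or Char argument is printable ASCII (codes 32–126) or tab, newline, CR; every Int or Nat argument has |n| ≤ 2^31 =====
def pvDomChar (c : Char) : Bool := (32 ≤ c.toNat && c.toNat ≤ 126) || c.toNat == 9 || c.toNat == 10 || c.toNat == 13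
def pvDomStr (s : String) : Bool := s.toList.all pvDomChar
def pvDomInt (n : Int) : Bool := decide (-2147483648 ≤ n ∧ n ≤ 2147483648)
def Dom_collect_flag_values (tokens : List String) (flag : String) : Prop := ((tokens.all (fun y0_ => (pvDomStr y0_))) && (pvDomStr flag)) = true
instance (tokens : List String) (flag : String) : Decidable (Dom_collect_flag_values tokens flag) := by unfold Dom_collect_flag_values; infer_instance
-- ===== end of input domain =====

-- B replaces A's index-based outer while loop with a nested collecting loop by one
-- flat scan over the tokens maintaining a boolean `collecting` state (idiomatic; same cost).

-- ===== PORT A =====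
-- inner `while i < len(tokens) and not tokens[i].startswith("--")` loop of A
-- (fuel = remaining-iteration bound only, so the recursion is structural; each loop
-- advances i by at least 1, so fuel ≥ tokens.length - i never runs out)
def pvInnerA (tokens : List String) (fuel i : Nat) (vals : List String) : Nat × List String :=
  match fuel with
  | 0 => (i, vals)
  | fuel + 1 =>
    if i < tokens.length ∧ PySem.Str.startswith (tokens.getD i "") "--" = false then
      pvInnerA tokens fuel (i + 1) (vals ++ [tokens.getD i ""])
    else (i, vals)

-- outer `while i < len(tokens)` loop of A
def pvOuterA (tokens : List String) (flag : String) (fuel i : Nat) (vals : List String) : List String :=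
  match fuel with
  | 0 => vals
  | fuel + 1 =>
    if i < tokens.length then
      if tokens.getD i "" == flag then
        let r := pvInnerA tokens fuel (i + 1) vals
        pvOuterA tokens flag fuel r.1 r.2
      else pvOuterA tokens flag fuel (i + 1) vals
    else vals

def collect_flag_values (tokens : List String) (flag : String) : List String :=
  pvOuterA tokens flag tokens.length 0 []

-- ===== PORT B =====
-- one step of B's flat for-loop; state = (collecting, vals)
def pvStepB (flag : String) (s : Bool × List String) (t : String) : Bool × List String :=
  if s.1 && !(PySem.Str.startswith t "--") then (s.1, s.2 ++ [t]) else ((t == flag), s.2)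

def collect_flag_values_alt (tokens : List String) (flag : String) : List String :=
  (tokens.foldl (pvStepB flag) (false, [])).2

-- ===== PRECONDITION & SPEC =====
def Spec_collect_flag_values (tokens : List String) (flag : String) (out : List String) : Prop := out = collect_flag_values_alt tokens flag
instance (tokens : List String) (flag : String) (out : List String) : Decidable (Spec_collect_flag_values tokens flag out) := by unfold Spec_collect_flag_values; infer_instance

-- ===== CLAIM (what is proved, stated in full; the proofs are below) =====
def Claim_equal_collect_flag_values : Prop := ∀ (tokens : List String) (flag : String), Dom_collect_flag_values tokens flag → Spec_collect_flag_values tokens flag (collect_flag_values tokens flag)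

-- ===== LEMMAS AND PROOFS =====

-- one step of B's fold from a non-collecting state
theorem pv_stepB_false (flag t : String) (vals : List String) :
    pvStepB flag (false, vals) t = ((t == flag), vals) := by
  simp [pvStepB]

-- one step of B's fold from a collecting state
theorem pv_stepB_true (flag t : String) (vals : List String) :
    pvStepB flag (true, vals) t =
      if PySem.Str.startswith t "--" = false then (true, vals ++ [t]) else ((t == flag), vals) := by
  by_cases hs : PySem.Str.startswith t "--" = false
  · simp [pvStepB]
  · simp only [Bool.not_eq_false] at hs
    simp [pvStepB]

-- the inner loop returns (i, vals) whenever the index is already past the end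
theorem pv_innerA_stop_past (tokens : List String) (fuel i : Nat) (vals : List String)
    (h : tokens.length ≤ i) : pvInnerA tokens fuel i vals = (i, vals) := by
  cases fuel with
  | zero => rfl
  | succ fuel =>
    show (if _ ∧ _ then _ else _) = _
    rw [if_neg (by intro hc; omega)]

-- Both loops of A, related to B's fold over the remaining suffix (fo = outer fuel):
-- the outer loop corresponds to the fold with collecting = false, and
-- "run the inner loop, then continue with the outer loop" to the fold with collecting = true.
theorem pv_main (tokens : List String) (flag : String) :
    ∀ fo : Nat,
      (∀ i, tokens.length - i ≤ fo → ∀ vals : List String,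
        pvOuterA tokens flag fo i vals
          = (List.foldl (pvStepB flag) (false, vals) (tokens.drop i)).2)
      ∧ (∀ fi i, tokens.length - i ≤ fo → tokens.length - i ≤ fi → ∀ vals : List String,
        pvOuterA tokens flag fo (pvInnerA tokens fi i vals).1 (pvInnerA tokens fi i vals).2
          = (List.foldl (pvStepB flag) (true, vals) (tokens.drop i)).2) := by
  intro fo
  induction fo with
  | zero =>
    constructor
    · intro i hi vals
      have hdrop : tokens.drop i = [] := List.drop_eq_nil_of_le (by omega)
      simp [pvOuterA, hdrop]
    · intro fi i hio hif vals
      have hdrop : tokens.drop i = [] := List.drop_eq_nil_of_le (by omega)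
      rw [pv_innerA_stop_past tokens fi i vals (by omega)]
      simp [pvOuterA, hdrop]
  | succ fo ih =>
    have hP : ∀ i, tokens.length - i ≤ fo + 1 → ∀ vals : List String,
        pvOuterA tokens flag (fo + 1) i vals
          = (List.foldl (pvStepB flag) (false, vals) (tokens.drop i)).2 := by
      intro i hi vals
      by_cases hlt : i < tokens.length
      · have hdrop : tokens.drop i = tokens.getD i "" :: tokens.drop (i + 1) := by
          rw [List.getD_eq_getElem _ _ hlt]
          exact List.drop_eq_getElem_cons hlt
        show (if _ then _ else _) = _
        rw [if_pos hlt, hdrop, List.foldl_cons, pv_stepB_false]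
        by_cases hf : tokens.getD i "" == flag
        · rw [if_pos hf, hf]
          exact ih.2 fo (i + 1) (by omega) (by omega) vals
        · have hf' : (tokens.getD i "" == flag) = false := by simpa using hf
          rw [if_neg hf, hf']
          exact ih.1 (i + 1) (by omega) vals
      · have hdrop : tokens.drop i = [] := List.drop_eq_nil_of_le (by omega)
        show (if _ then _ else _) = _
        rw [if_neg hlt, hdrop]
        rfl
    refine ⟨hP, ?_⟩
    intro fi
    induction fi with
    | zero =>
      intro i hio hif vals
      have hdrop : tokens.drop i = [] := List.drop_eq_nil_of_le (by omega)
      show pvOuterA tokens flag (fo + 1) (i, vals).1 (i, vals).2 = _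
      rw [hdrop, hP i hio vals, hdrop]
      rfl
    | succ fi ihf =>
      intro i hio hif vals
      by_cases hlt : i < tokens.length
      · have hdrop : tokens.drop i = tokens.getD i "" :: tokens.drop (i + 1) := by
          rw [List.getD_eq_getElem _ _ hlt]
          exact List.drop_eq_getElem_cons hlt
        by_cases hs : PySem.Str.startswith (tokens.getD i "") "--" = false
        · -- inner loop consumes the token as a value
          have hinner : pvInnerA tokens (fi + 1) i vals
              = pvInnerA tokens fi (i + 1) (vals ++ [tokens.getD i ""]) := by
            show (if _ ∧ _ then _ else _) = _
            rw [if_pos ⟨hlt, hs⟩]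
          rw [hinner, hdrop, List.foldl_cons, pv_stepB_true, if_pos hs]
          exact ihf (i + 1) (by omega) (by omega) (vals ++ [tokens.getD i ""])
        · -- inner loop stops at a '--' token; control returns to the outer loop at i
          have hinner : pvInnerA tokens (fi + 1) i vals = (i, vals) := by
            show (if _ ∧ _ then _ else _) = _
            rw [if_neg (by intro hc; exact hs hc.2)]
          rw [hinner]
          show pvOuterA tokens flag (fo + 1) i vals = _
          rw [hP i hio vals, hdrop, List.foldl_cons, List.foldl_cons,
            pv_stepB_false, pv_stepB_true, if_neg hs]
      · have hdrop : tokens.drop i = [] := List.drop_eq_nil_of_le (by omega)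
        rw [pv_innerA_stop_past tokens (fi + 1) i vals (by omega)]
        show pvOuterA tokens flag (fo + 1) i vals = _
        rw [hP i hio vals, hdrop]
        rfl

-- ===== VERDICT (by name: the statement is the Claim_ definition above) =====
theorem collect_flag_values_spec : Claim_equal_collect_flag_values := by
  intro tokens flag _
  unfold Spec_collect_flag_values collect_flag_values collect_flag_values_alt
  have := (pv_main tokens flag tokens.length).1 0 (by omega) []
  simpa using this
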